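-- pv_equiv track=rewrite | github.com/MareksCode/AdventOfCode2025 | Day3/part2.py | getBiggestNumAndXInRange
-- ===== SOURCE A (Python) =====
-- def getBiggestNumAndXInRange(startXIndex, bankString, endXIndex):
--     biggestNum = -1
--     biggestX = -1
--     for x in range(startXIndex, endXIndex + 1):
--         numAtX = int(bankString[x])
--         if numAtX > biggestNum:
--             biggestNum = numAtX
--             biggestX = x
--     return biggestNum, biggestX
-- ===== SOURCE B (Python) =====
-- def getBiggestNumAndXInRange(startXIndex, bankString, endXIndex):
--     # Search digit values from 9 downward; the first position holding the
--     # current value is the answer (first index wins ties, as in one-pass max).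
--     for d in range(9, -1, -1):
--         for x in range(startXIndex, endXIndex + 1):
--             if int(bankString[x]) == d:
--                 return d, x
--     return -1, -1
-- ===== Notes on version B (the rewrite author's own statement) =====
-- stated objective: alternative
-- what changed: B replaces A's single pass with a running maximum by an outer countdown over the ten possible digit values with an inner positional scan returning the first match, exploiting the bounded digit domain.
import Mathlib
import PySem

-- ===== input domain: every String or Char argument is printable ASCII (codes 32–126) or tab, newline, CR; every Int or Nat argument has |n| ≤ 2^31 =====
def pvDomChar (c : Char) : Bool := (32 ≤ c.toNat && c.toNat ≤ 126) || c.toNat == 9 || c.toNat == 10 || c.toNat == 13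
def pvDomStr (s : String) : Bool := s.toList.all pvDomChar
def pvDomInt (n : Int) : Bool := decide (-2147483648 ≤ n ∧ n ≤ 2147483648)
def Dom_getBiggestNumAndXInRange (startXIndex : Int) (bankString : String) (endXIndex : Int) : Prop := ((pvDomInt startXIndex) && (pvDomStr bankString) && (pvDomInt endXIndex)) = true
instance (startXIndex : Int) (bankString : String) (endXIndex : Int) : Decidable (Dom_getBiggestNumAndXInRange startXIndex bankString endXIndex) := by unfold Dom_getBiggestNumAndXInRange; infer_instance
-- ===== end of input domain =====

-- B changes the traversal (outer countdown over digit values, inner first-position scan)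
-- instead of A's one-pass running maximum; the return value is proved identical on Pre_.

-- int(bankString[x]) for one character; exact on Pre_ (index in range, digit char).
-- Outside Pre_ Python raises; -1 stands for that unreachable case.
def pyDigitAt (s : String) (x : Int) : Int :=
  match PySem.Str.pyGet? s x with
  | some c => (c.toNat : Int) - 48
  | none => -1

-- ===== PORT A =====
def getBiggestNumAndXInRange (startXIndex : Int) (bankString : String) (endXIndex : Int) : Int × Int :=
  (PySem.List.pyRange startXIndex (endXIndex + 1) 1).foldl
    (fun (st : Int × Int) x =>
      let numAtX := pyDigitAt bankString x
      if numAtX > st.1 then (numAtX, x) else st)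
    (-1, -1)

-- ===== PORT B =====
-- inner loop: first x in xs with int(bankString[x]) == d
def altInner (bank : String) (d : Int) : List Int → Option Int
  | [] => none
  | x :: rest => if pyDigitAt bank x = d then some x else altInner bank d rest

-- outer loop over the digit countdown list
def altOuter (bank : String) (xs : List Int) : List Int → Int × Int
  | [] => (-1, -1)
  | d :: ds =>
    match altInner bank d xs with
    | some x => (d, x)
    | none => altOuter bank xs ds

def getBiggestNumAndXInRange_alt (startXIndex : Int) (bankString : String) (endXIndex : Int) : Int × Int :=
  altOuter bankString (PySem.List.pyRange startXIndex (endXIndex + 1) 1)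
    (PySem.List.pyRange 9 (-1) (-1))

-- ===== PRECONDITION & SPEC =====
-- Pre_: the scanned range is empty, or it stays inside the string (Python indexing,
-- negative from the end) and every scanned character is a decimal digit — exactly
-- where A returns (otherwise int()/indexing raises ValueError/IndexError).
-- The leading bounds make the condition evaluable without enumerating a huge range.
def Pre_getBiggestNumAndXInRange (startXIndex : Int) (bankString : String) (endXIndex : Int) : Prop :=
  endXIndex < startXIndex ∨
  (-(PySem.Str.len bankString) ≤ startXIndex ∧ endXIndex < PySem.Str.len bankString ∧
    ∀ x ∈ PySem.List.pyRange startXIndex (endXIndex + 1) 1,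
      Option.any PySem.Chars.isdigit (PySem.Str.pyGet? bankString x) = true)

instance (startXIndex : Int) (bankString : String) (endXIndex : Int) : Decidable (Pre_getBiggestNumAndXInRange startXIndex bankString endXIndex) := by unfold Pre_getBiggestNumAndXInRange; infer_instance

def pvWitness_getBiggestNumAndXInRange : Int × String × Int := (0, "3912", 3)

def Spec_getBiggestNumAndXInRange (startXIndex : Int) (bankString : String) (endXIndex : Int) (out : Int × Int) : Prop := out = getBiggestNumAndXInRange_alt startXIndex bankString endXIndex
instance (startXIndex : Int) (bankString : String) (endXIndex : Int) (out : Int × Int) : Decidable (Spec_getBiggestNumAndXInRange startXIndex bankString endXIndex out) := by unfold Spec_getBiggestNumAndXInRange; infer_instance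

-- ===== CLAIM (what is proved, stated in full; the proofs are below) =====
def Claim_equal_getBiggestNumAndXInRange : Prop := ∀ (startXIndex : Int) (bankString : String) (endXIndex : Int), Dom_getBiggestNumAndXInRange startXIndex bankString endXIndex → Pre_getBiggestNumAndXInRange startXIndex bankString endXIndex → Spec_getBiggestNumAndXInRange startXIndex bankString endXIndex (getBiggestNumAndXInRange startXIndex bankString endXIndex)

-- ===== LEMMAS AND PROOFS =====

-- The common characterisation: r is the maximum digit in xs together with the first
-- position attaining it (positions in xs are strictly increasing, so "first" = "smallest").
def Good (bank : String) (xs : List Int) (r : Int × Int) : Prop :=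
  (xs = [] ∧ r = (-1, -1)) ∨
  (r.2 ∈ xs ∧ pyDigitAt bank r.2 = r.1 ∧
    (∀ y ∈ xs, pyDigitAt bank y ≤ r.1) ∧
    (∀ y ∈ xs, y < r.2 → pyDigitAt bank y < r.1))

theorem good_unique {bank : String} {xs : List Int} {r1 r2 : Int × Int}
    (h1 : Good bank xs r1) (h2 : Good bank xs r2) : r1 = r2 := by
  rcases h1 with ⟨hn, h1⟩ | ⟨hm1, hv1, hb1, hf1⟩
  · rcases h2 with ⟨_, h2⟩ | ⟨hm2, _⟩
    · rw [h1, h2]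
    · simp [hn] at hm2
  · rcases h2 with ⟨hn, _⟩ | ⟨hm2, hv2, hb2, hf2⟩
    · simp [hn] at hm1
    · have e1 : r1.1 = r2.1 := le_antisymm (hv1 ▸ hb2 r1.2 hm1) (hv2 ▸ hb1 r2.2 hm2)
      have e2 : r1.2 = r2.2 := by
        rcases lt_trichotomy r1.2 r2.2 with h | h | h
        · have := hf2 r1.2 hm1 h; omega
        · exact h
        · have := hf1 r2.2 hm2 h; omega
      exact Prod.ext e1 e2

theorem foldA_good (bank : String) (xs : List Int)
    (hp : xs.Pairwise (· < ·)) (hv : ∀ y ∈ xs, 0 ≤ pyDigitAt bank y) :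
    Good bank xs (xs.foldl
      (fun (st : Int × Int) x =>
        let numAtX := pyDigitAt bank x
        if numAtX > st.1 then (numAtX, x) else st) (-1, -1)) := by
  induction xs using List.reverseRecOn with
  | nil => exact Or.inl ⟨rfl, rfl⟩
  | append_singleton xs x ih =>
    have hp' : xs.Pairwise (· < ·) := (List.pairwise_append.mp hp).1
    have hlt : ∀ y ∈ xs, y < x := by
      intro y hy
      exact (List.pairwise_append.mp hp).2.2 y hy x (List.mem_singleton_self x)
    have hv' : ∀ y ∈ xs, 0 ≤ pyDigitAt bank y := fun y hy => hv y (List.mem_append_left _ hy)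
    have hvx : 0 ≤ pyDigitAt bank x := hv x (List.mem_append_right _ (List.mem_singleton_self x))
    rw [List.foldl_append]
    set r := xs.foldl
      (fun (st : Int × Int) x =>
        let numAtX := pyDigitAt bank x
        if numAtX > st.1 then (numAtX, x) else st) (-1, -1) with hrdef
    show Good bank (xs ++ [x]) (if pyDigitAt bank x > r.1 then (pyDigitAt bank x, x) else r)
    have hg := ih hp' hv'
    by_cases h : pyDigitAt bank x > r.1
    · rw [if_pos h]
      refine Or.inr ⟨List.mem_append_right _ (List.mem_singleton_self x), rfl, ?_, ?_⟩
      · intro y hy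
        rcases List.mem_append.mp hy with hy | hy
        · rcases hg with ⟨hn, _⟩ | ⟨_, _, hb, _⟩
          · simp [hn] at hy
          · exact le_of_lt (lt_of_le_of_lt (hb y hy) h)
        · rw [List.mem_singleton.mp hy]
      · intro y hy hylt
        rcases List.mem_append.mp hy with hy | hy
        · rcases hg with ⟨hn, _⟩ | ⟨_, _, hb, _⟩
          · simp [hn] at hy
          · exact lt_of_le_of_lt (hb y hy) h
        · rw [List.mem_singleton.mp hy] at hylt; omega
    · rw [if_neg h]
      rcases hg with ⟨hn, hr⟩ | ⟨hm, hve, hb, hf⟩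
      · exfalso; rw [hr] at h; simp at h; omega
      · refine Or.inr ⟨List.mem_append_left _ hm, hve, ?_, ?_⟩
        · intro y hy
          rcases List.mem_append.mp hy with hy | hy
          · exact hb y hy
          · rw [List.mem_singleton.mp hy]; omega
        · intro y hy hylt
          rcases List.mem_append.mp hy with hy | hy
          · exact hf y hy hylt
          · rw [List.mem_singleton.mp hy] at hylt
            have := hlt r.2 hm; omega

theorem altInner_some {bank : String} {d x : Int} : ∀ {xs : List Int},
    xs.Pairwise (· < ·) → altInner bank d xs = some x →
    x ∈ xs ∧ pyDigitAt bank x = d ∧ ∀ y ∈ xs, y < x → pyDigitAt bank y ≠ d := by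
  intro xs
  induction xs with
  | nil => intro _ h; simp [altInner] at h
  | cons z zs ih =>
    intro hp h
    rw [altInner] at h
    by_cases hz : pyDigitAt bank z = d
    · rw [if_pos hz] at h
      injection h with h; subst h
      refine ⟨List.mem_cons_self, hz, ?_⟩
      intro y hy hylt
      rcases List.mem_cons.mp hy with rfl | hy
      · omega
      · have := (List.pairwise_cons.mp hp).1 y hy; omega
    · rw [if_neg hz] at h
      obtain ⟨hm, hvd, hfirst⟩ := ih (List.pairwise_cons.mp hp).2 h
      refine ⟨List.mem_cons_of_mem _ hm, hvd, ?_⟩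
      intro y hy hylt
      rcases List.mem_cons.mp hy with rfl | hy
      · exact hz
      · exact hfirst y hy hylt

theorem altInner_none {bank : String} {d : Int} : ∀ {xs : List Int},
    altInner bank d xs = none → ∀ y ∈ xs, pyDigitAt bank y ≠ d := by
  intro xs
  induction xs with
  | nil => intro _ y hy; simp at hy
  | cons z zs ih =>
    intro h y hy
    rw [altInner] at h
    by_cases hz : pyDigitAt bank z = d
    · rw [if_pos hz] at h; exact absurd h (by simp)
    · rw [if_neg hz] at h
      rcases List.mem_cons.mp hy with rfl | hy
      · exact hz
      · exact ih h y hy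

theorem altOuter_good (bank : String) (xs : List Int) (n : Nat)
    (hne : xs ≠ []) (hp : xs.Pairwise (· < ·))
    (hv : ∀ y ∈ xs, 0 ≤ pyDigitAt bank y ∧ pyDigitAt bank y ≤ (n : Int)) :
    Good bank xs (altOuter bank xs (PySem.List.pyRange (n : Int) (-1) (-1))) := by
  induction n with
  | zero =>
    rw [PySem.List.pyRange_neg_one_cons (by norm_num), altOuter]
    rcases h : altInner bank ((0 : Nat) : Int) xs with _ | x
    · exfalso
      obtain ⟨z, hz⟩ := List.exists_mem_of_ne_nil xs hne
      have h1 := altInner_none h z hz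
      have h2 := hv z hz
      simp only [Nat.cast_zero] at h1 h2
      omega
    · obtain ⟨hm, hvd, hfirst⟩ := altInner_some hp h
      simp only [Nat.cast_zero] at hvd hv ⊢
      refine Or.inr ⟨hm, hvd, ?_, ?_⟩
      · intro y hy; have := hv y hy; omega
      · intro y hy hylt
        have h1 := hfirst y hy hylt
        have h2 := hv y hy
        simp only [Nat.cast_zero] at h1
        omega
  | succ k ih =>
    rw [PySem.List.pyRange_neg_one_cons (by push_cast; omega), altOuter]
    rcases h : altInner bank (((k + 1 : Nat)) : Int) xs with _ | x
    · have hall := altInner_none h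
      have heq : (((k + 1 : Nat)) : Int) - 1 = ((k : Nat) : Int) := by push_cast; omega
      rw [heq]
      apply ih
      intro y hy
      have h1 := hv y hy
      have h2 := hall y hy
      push_cast at h1 h2 ⊢
      omega
    · obtain ⟨hm, hvd, hfirst⟩ := altInner_some hp h
      show Good bank xs (((k + 1 : Nat) : Int), x)
      refine Or.inr ⟨hm, hvd, ?_, ?_⟩
      · intro y hy; have := hv y hy; omega
      · intro y hy hylt
        have h1 := hfirst y hy hylt
        have h2 := hv y hy
        push_cast at h1 h2 ⊢
        omega

theorem altOuter_nil (bank : String) : ∀ ds : List Int, altOuter bank [] ds = (-1, -1) := by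
  intro ds
  induction ds with
  | nil => rfl
  | cons d ds ih => rw [altOuter, altInner]; exact ih

theorem digit_bounds {bank : String} {x : Int}
    (h : Option.any PySem.Chars.isdigit (PySem.Str.pyGet? bank x) = true) :
    0 ≤ pyDigitAt bank x ∧ pyDigitAt bank x ≤ 9 := by
  unfold pyDigitAt
  rcases hg : PySem.Str.pyGet? bank x with _ | c
  · rw [hg] at h; simp [Option.any] at h
  · rw [hg, Option.any_some] at h
    simp only [PySem.Chars.isdigit, Bool.and_eq_true, decide_eq_true_eq, Char.le_def] at h
    have h1 : 48 ≤ c.toNat ∧ c.toNat ≤ 57 :=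
      ⟨UInt32.le_iff_toNat_le.mp h.1, UInt32.le_iff_toNat_le.mp h.2⟩
    show 0 ≤ (c.toNat : Int) - 48 ∧ (c.toNat : Int) - 48 ≤ 9
    omega

-- ===== VERDICT (by name: the statement is the Claim_ definition above) =====
theorem getBiggestNumAndXInRange_spec : Claim_equal_getBiggestNumAndXInRange := by
  intro s bank e _ hpre
  unfold Spec_getBiggestNumAndXInRange getBiggestNumAndXInRange getBiggestNumAndXInRange_alt
  set xs := PySem.List.pyRange s (e + 1) 1 with hxs
  have hdig : ∀ x ∈ xs, Option.any PySem.Chars.isdigit (PySem.Str.pyGet? bank x) = true := by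
    rcases hpre with hlt | ⟨_, _, hpre⟩
    · intro x hx
      rw [hxs, PySem.List.pyRange_one_eq_nil (by omega)] at hx
      exact absurd hx (List.not_mem_nil)
    · exact hpre
  rcases eq_or_ne xs [] with hnil | hne
  · rw [hnil]
    rw [altOuter_nil]
    rfl
  · have hp : xs.Pairwise (· < ·) := PySem.List.pairwise_lt_pyRange_one s (e + 1)
    have hb : ∀ y ∈ xs, 0 ≤ pyDigitAt bank y ∧ pyDigitAt bank y ≤ 9 :=
      fun y hy => digit_bounds (hdig y hy)
    have g1 := foldA_good bank xs hp (fun y hy => (hb y hy).1)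
    have g2 := altOuter_good bank xs 9 hne hp (by intro y hy; have := hb y hy; push_cast; omega)
    have h9 : ((9 : Nat) : Int) = (9 : Int) := by norm_num
    rw [h9] at g2
    exact good_unique g1 g2
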